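-- pv_equiv track=rewrite | github.com/jokajak/advent_of_code | src/aoc/y2023/d19.py | get_approved_paths
-- ===== SOURCE A (Python) =====
-- from collections import deque, defaultdict
--
-- def get_approved_paths(workflows):
--     max_iters = 10**100
--     valid_paths = []
--     target_conditions = deque()
--     target_conditions.append(("A", ["A"]))
--     iters = 0
--     while len(target_conditions) > 0 and iters < max_iters:
--         iters += 1
--         # get the condition we're trying to resolve
--         target_condition, path = target_conditions.popleft()
--         for workflow, conditions in workflows.items():
--             for condition, target in conditions:
--                 if target == target_condition:
--                     new_path = list(path)
--                     new_path.append(condition)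
--                     if workflow == "in":
--                         valid_paths.append(new_path)
--                     else:
--                         target_conditions.append((workflow, new_path))
--     return valid_paths
-- ===== SOURCE B (Python) =====
-- def get_approved_paths(workflows):
--     # Reverse index target -> [(workflow, condition)] built once, then a queue of
--     # unresolved targets expanded by a single lookup with filter/map comprehensions
--     # (no rescan of all workflows per step, no interleaved branching inside the scan).
--     index = {}
--     for workflow, conditions in workflows.items():
--         for condition, target in conditions:
--             index.setdefault(target, []).append((workflow, condition))
--     max_iters = 10**100  # same safety cap as A (keeps the loop finite on cyclic workflow graphs)
--     valid_paths = []
--     queue = [("A", ["A"])]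
--     iters = 0
--     while queue and iters < max_iters:
--         iters += 1
--         (target, path), queue = queue[0], queue[1:]
--         hits = index.get(target, [])
--         valid_paths += [path + [c] for w, c in hits if w == "in"]
--         queue += [(w, path + [c]) for w, c in hits if w != "in"]
--     return valid_paths
-- ===== Notes on version B (the rewrite author's own statement) =====
-- stated objective: alternative
-- what changed: B precomputes a reverse index target -> [(workflow, condition)] once and expands each queue entry by one lookup split into two filter/map comprehensions (finished paths vs. new queue entries), instead of A's per-step rescan of every workflow's edges with interleaved branching.
import Mathlib
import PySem

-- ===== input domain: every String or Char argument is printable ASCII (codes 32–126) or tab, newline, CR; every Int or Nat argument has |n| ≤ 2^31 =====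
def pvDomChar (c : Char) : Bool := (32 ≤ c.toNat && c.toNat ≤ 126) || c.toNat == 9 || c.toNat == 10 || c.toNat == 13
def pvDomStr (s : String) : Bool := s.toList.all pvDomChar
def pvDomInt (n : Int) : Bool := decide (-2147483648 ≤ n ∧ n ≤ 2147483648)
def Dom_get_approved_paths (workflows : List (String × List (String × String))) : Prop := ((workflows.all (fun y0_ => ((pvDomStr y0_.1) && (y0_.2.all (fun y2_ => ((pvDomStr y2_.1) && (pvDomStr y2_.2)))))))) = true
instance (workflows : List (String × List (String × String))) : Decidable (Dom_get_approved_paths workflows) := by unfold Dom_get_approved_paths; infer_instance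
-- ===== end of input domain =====

-- B builds a reverse index target -> [(workflow, condition)] once and expands each queue
-- entry by one lookup split into two filter/map passes, instead of A's per-step rescan of
-- every workflow's edges with interleaved branching (alternative algorithm, same results).

-- ===== PORT A =====
-- one BFS iteration of A: scan every workflow's conditions for edges into `t`,
-- appending found paths to valid_paths (for "in") or to the queue (otherwise)
def pvStepA (workflows : List (String × List (String × String))) (t : String)
    (path : List String) (st : List (List String) × List (String × List String)) :
    List (List String) × List (String × List String) :=
  workflows.foldl (fun st p =>
    p.2.foldl (fun st ct =>
      if ct.2 == t then
        let new_path := path ++ [ct.1]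
        if p.1 == "in" then (st.1 ++ [new_path], st.2)
        else (st.1, st.2 ++ [(p.1, new_path)])
      else st) st) st

-- the while loop; fuel = max_iters = 10^100 as in A
def pvLoopA (workflows : List (String × List (String × String))) :
    Nat → List (String × List String) → List (List String) → List (List String)
  | 0, _, vp => vp
  | _, [], vp => vp
  | Nat.succ n, (t, path) :: rest, vp =>
      let st := pvStepA workflows t path (vp, rest)
      pvLoopA workflows n st.2 st.1

def get_approved_paths (workflows : List (String × List (String × String))) : List (List String) :=
  pvLoopA workflows (10 ^ 100) [("A", ["A"])] []

-- ===== PORT B =====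
-- index.setdefault(target, []).append((workflow, condition)) over both loops of Source B
def pvIndexB (workflows : List (String × List (String × String))) :
    PySem.Dict String (List (String × String)) :=
  workflows.foldl (fun d p =>
    p.2.foldl (fun d ct => d.modify ct.2 [] (· ++ [(p.1, ct.1)])) d) PySem.Dict.empty

-- valid_paths += [path + [c] for w, c in hits if w == "in"]
def pvDone (hits : List (String × String)) (path : List String) : List (List String) :=
  (hits.filter (fun wc => wc.1 == "in")).map (fun wc => path ++ [wc.2])

-- queue += [(w, path + [c]) for w, c in hits if w != "in"]
def pvTodo (hits : List (String × String)) (path : List String) : List (String × List String) :=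
  (hits.filter (fun wc => !(wc.1 == "in"))).map (fun wc => (wc.1, path ++ [wc.2]))

-- the while loop of Source B; one index lookup per popped entry
def pvLoopB (index : PySem.Dict String (List (String × String))) :
    Nat → List (String × List String) → List (List String) → List (List String)
  | 0, _, vp => vp
  | _, [], vp => vp
  | Nat.succ n, (t, path) :: rest, vp =>
      let hits := index.getD t []
      pvLoopB index n (rest ++ pvTodo hits path) (vp ++ pvDone hits path)

def get_approved_paths_alt (workflows : List (String × List (String × String))) : List (List String) :=
  pvLoopB (pvIndexB workflows) (10 ^ 100) [("A", ["A"])] []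

-- ===== PRECONDITION & SPEC =====
def Spec_get_approved_paths (workflows : List (String × List (String × String))) (out : List (List String)) : Prop := out = get_approved_paths_alt workflows
instance (workflows : List (String × List (String × String))) (out : List (List String)) : Decidable (Spec_get_approved_paths workflows out) := by unfold Spec_get_approved_paths; infer_instance

-- ===== CLAIM (what is proved, stated in full; the proofs are below) =====
def Claim_equal_get_approved_paths : Prop := ∀ (workflows : List (String × List (String × String))), Dom_get_approved_paths workflows → Spec_get_approved_paths workflows (get_approved_paths workflows)

-- ===== LEMMAS AND PROOFS =====

-- all reverse edges as (target, (workflow, condition)) triples in scan order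
def pvEdges (workflows : List (String × List (String × String))) : List (String × (String × String)) :=
  workflows.flatMap (fun p => p.2.map (fun ct => (ct.2, (p.1, ct.1))))

-- edges of `workflows` into target `t`, as (workflow, condition) pairs in scan order
def pvHits (workflows : List (String × List (String × String))) (t : String) : List (String × String) :=
  (((pvEdges workflows).filter (fun p => p.1 == t)).map (·.2))

theorem pvIndexB_eq_flat (workflows : List (String × List (String × String))) :
    pvIndexB workflows
      = (pvEdges workflows).foldl (fun d e => d.modify e.1 [] (· ++ [e.2])) PySem.Dict.empty := by
  unfold pvIndexB pvEdges
  generalize (PySem.Dict.empty : PySem.Dict String (List (String × String))) = d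
  induction workflows generalizing d with
  | nil => rfl
  | cons p rest ih =>
      simp only [List.foldl_cons, List.flatMap_cons, List.foldl_append, List.foldl_map]
      exact ih _

theorem pvIndexB_getD (workflows : List (String × List (String × String))) (t : String) :
    (pvIndexB workflows).getD t [] = pvHits workflows t := by
  rw [pvIndexB_eq_flat]
  unfold pvHits
  rw [PySem.Dict.getD_foldl_modify_append]
  simp

theorem pvStepA_eq (workflows : List (String × List (String × String))) (t : String)
    (path : List String) (st : List (List String) × List (String × List String)) :
    pvStepA workflows t path st
      = (st.1 ++ pvDone (pvHits workflows t) path, st.2 ++ pvTodo (pvHits workflows t) path) := by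
  unfold pvStepA pvHits pvEdges
  induction workflows generalizing st with
  | nil => simp [pvDone, pvTodo]
  | cons p rest ih =>
      simp only [List.foldl_cons, List.flatMap_cons, List.filter_append, List.map_append]
      rw [ih]
      have hinner : ∀ (st : List (List String) × List (String × List String)),
          (p.2.foldl (fun st ct =>
            if ct.2 == t then
              let new_path := path ++ [ct.1]
              if p.1 == "in" then (st.1 ++ [new_path], st.2)
              else (st.1, st.2 ++ [(p.1, new_path)])
            else st) st)
          = (st.1 ++ pvDone (((p.2.map (fun ct => (ct.2, (p.1, ct.1)))).filter (fun q => q.1 == t)).map (·.2)) path,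
             st.2 ++ pvTodo (((p.2.map (fun ct => (ct.2, (p.1, ct.1)))).filter (fun q => q.1 == t)).map (·.2)) path) := by
        intro st
        induction p.2 generalizing st with
        | nil => simp [pvDone, pvTodo]
        | cons ct cs ih2 =>
            simp only [List.foldl_cons]
            rw [ih2]
            by_cases h : ct.2 == t
            · by_cases hin : p.1 == "in" <;>
                simp [pvDone, pvTodo, h, hin, List.append_assoc]
            · simp [h]
      rw [hinner]
      simp [pvDone, pvTodo, List.filter_append, List.map_append, List.append_assoc]

theorem pvLoop_eq (workflows : List (String × List (String × String))) :
    ∀ (n : Nat) (q : List (String × List String)) (vp : List (List String)),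
      pvLoopA workflows n q vp = pvLoopB (pvIndexB workflows) n q vp := by
  intro n
  induction n with
  | zero => intro q vp; cases q <;> rfl
  | succ n ih =>
      intro q vp
      cases q with
      | nil => rfl
      | cons hd rest =>
          obtain ⟨t, path⟩ := hd
          show pvLoopA workflows n (pvStepA workflows t path (vp, rest)).2
                 (pvStepA workflows t path (vp, rest)).1
             = pvLoopB (pvIndexB workflows) n
                 (rest ++ pvTodo ((pvIndexB workflows).getD t []) path)
                 (vp ++ pvDone ((pvIndexB workflows).getD t []) path)
          rw [pvStepA_eq, ih, pvIndexB_getD]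

-- ===== VERDICT (by name: the statement is the Claim_ definition above) =====
theorem get_approved_paths_spec : Claim_equal_get_approved_paths := by
  intro workflows _
  show get_approved_paths workflows = get_approved_paths_alt workflows
  unfold get_approved_paths get_approved_paths_alt
  exact pvLoop_eq workflows _ _ _
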